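-- pv_equiv track=rewrite | github.com/darshhv/talentscout-assistant | app.py | extract_skills_from_resume
-- ===== SOURCE A (Python) =====
-- def extract_skills_from_resume(text):
--     skills = []
--     lines = text.lower().split("\n")
--     keywords = ["python", "java", "react", "docker", "aws", "c++", "sql", "javascript",
--                 "html", "css", "tensorflow", "pytorch", "git", "linux", "node.js", "azure", "gcp"]
--     for kw in keywords:
--         for line in lines:
--             if kw in line:
--                 skills.append(kw.capitalize())
--                 break
--     return sorted(set(skills))
-- ===== SOURCE B (Python) =====
-- def extract_skills_from_resume(text):
--     keywords = ["python", "java", "react", "docker", "aws", "c++", "sql", "javascript",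
--                 "html", "css", "tensorflow", "pytorch", "git", "linux", "node.js", "azure", "gcp"]
--     low = text.lower()
--     return sorted({kw.capitalize() for kw in keywords if kw in low})
-- ===== Notes on version B (the rewrite author's own statement) =====
-- stated objective: simpler
-- what changed: Drops the line split and the nested keyword-by-line loop with break; tests each keyword once against the whole lowercased text (a keyword contains no newline, so it occurs in some line iff it occurs in the joined text) and builds the result as one sorted set comprehension.
import Mathlib
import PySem

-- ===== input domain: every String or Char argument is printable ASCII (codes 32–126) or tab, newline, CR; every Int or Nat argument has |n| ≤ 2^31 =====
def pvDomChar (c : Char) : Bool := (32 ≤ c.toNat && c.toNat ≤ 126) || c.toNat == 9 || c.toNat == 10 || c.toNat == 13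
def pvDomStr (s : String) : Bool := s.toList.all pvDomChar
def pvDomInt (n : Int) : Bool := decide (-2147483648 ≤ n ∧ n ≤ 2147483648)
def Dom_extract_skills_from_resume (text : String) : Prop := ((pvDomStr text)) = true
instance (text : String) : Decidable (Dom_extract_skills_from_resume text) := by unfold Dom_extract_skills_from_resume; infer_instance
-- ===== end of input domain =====

-- B drops the line split and the per-keyword scan over the lines (with break): it tests each
-- keyword once against the whole lowercased text and returns one sorted set comprehension
-- (objective: simpler; a keyword contains no newline, so it is in some line iff in the text).

-- the fixed keyword list both versions share
def pvSkillKeywords : List String :=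
  ["python", "java", "react", "docker", "aws", "c++", "sql", "javascript",
   "html", "css", "tensorflow", "pytorch", "git", "linux", "node.js", "azure", "gcp"]

-- kw.capitalize(): first char title-cased, rest lowered — hand port, exact on ASCII
def pvCapitalize (s : String) : String :=
  match s.toList with
  | [] => s
  | c :: t => String.ofList (PySem.Chars.upperChar c :: PySem.Chars.lower t)

-- ===== PORT A =====
-- inner 'for line in lines: if kw in line: skills.append(kw.capitalize()); break'
def pvScanLines (kw : String) (skills : List String) : List String → List String
  | [] => skills
  | line :: rest =>
      if PySem.Str.isIn kw line then skills ++ [pvCapitalize kw]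
      else pvScanLines kw skills rest

def extract_skills_from_resume (text : String) : List String :=
  let lines := (PySem.Str.split? (PySem.Str.lower text) "\n").getD []  -- sep "\n" ≠ "": never none
  let skills := pvSkillKeywords.foldl (fun sk kw => pvScanLines kw sk lines) []
  PySem.List.sorted (PySem.Set.ofList skills) (fun x => x) false

-- ===== PORT B =====
def extract_skills_from_resume_alt (text : String) : List String :=
  let low := PySem.Str.lower text
  PySem.List.sorted
    (PySem.Set.ofList ((pvSkillKeywords.filter (fun kw => PySem.Str.isIn kw low)).map pvCapitalize))
    (fun x => x) false

-- ===== PRECONDITION & SPEC =====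
def Spec_extract_skills_from_resume (text : String) (out : List String) : Prop := out = extract_skills_from_resume_alt text
instance (text : String) (out : List String) : Decidable (Spec_extract_skills_from_resume text out) := by unfold Spec_extract_skills_from_resume; infer_instance

-- ===== CLAIM (what is proved, stated in full; the proofs are below) =====
def Claim_equal_extract_skills_from_resume : Prop := ∀ (text : String), Dom_extract_skills_from_resume text → Spec_extract_skills_from_resume text (extract_skills_from_resume text)

-- ===== LEMMAS AND PROOFS =====

-- the lines of cs, split at '\n' (structural reformulation of splitOn cs ['\n'])
def pvLinesOf : List Char → List (List Char)
  | [] => [[]]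
  | c :: t => if c = '\n' then [] :: pvLinesOf t else (pvLinesOf t).modifyHead (c :: ·)

theorem pvLinesOf_ne_nil (cs : List Char) : pvLinesOf cs ≠ [] := by
  induction cs with
  | nil => simp [pvLinesOf]
  | cons c t ih =>
    simp only [pvLinesOf]
    split_ifs
    · simp
    · cases h : pvLinesOf t with
      | nil => exact absurd h ih
      | cons a b => simp

theorem pvSplitOn_go_eq (fuel : Nat) :
    ∀ (l cur : List Char) (accL : List (List Char)), l.length ≤ fuel →
      PySem.Chars.splitOn.go ['\n'] fuel l cur accL =
        accL.reverse ++ (pvLinesOf l).modifyHead (cur.reverse ++ ·) := by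
  induction fuel with
  | zero =>
    intro l cur accL hl
    have hnil : l = [] := List.length_eq_zero_iff.mp (Nat.le_zero.mp hl)
    subst hnil
    simp [PySem.Chars.splitOn.go, pvLinesOf]
  | succ fuel ih =>
    intro l cur accL hl
    cases l with
    | nil =>
      rw [PySem.Chars.splitOn.go] <;> simp [pvLinesOf]
    | cons c rest =>
      by_cases hc : c = '\n'
      · subst hc
        rw [PySem.Chars.splitOn.go]
        simp only [List.isPrefixOf, BEq.rfl, Bool.true_and, if_true]
        rw [show List.drop (['\n'] : List Char).length ('\n' :: rest) = rest from rfl]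
        rw [ih rest [] (cur.reverse :: accL) (by simpa using Nat.succ_le_succ_iff.mp hl)]
        cases hL : pvLinesOf rest with
        | nil => exact absurd hL (pvLinesOf_ne_nil rest)
        | cons h r => simp [pvLinesOf, hL]
      · rw [PySem.Chars.splitOn.go]
        have hpre : List.isPrefixOf ['\n'] (c :: rest) = false := by
          simp [List.isPrefixOf]
          exact fun h => absurd h.symm hc
        simp only [hpre, Bool.false_eq_true, if_false]
        rw [ih rest (c :: cur) accL (by simpa using Nat.succ_le_succ_iff.mp hl)]
        cases hL : pvLinesOf rest with
        | nil => exact absurd hL (pvLinesOf_ne_nil rest)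
        | cons h r => simp [pvLinesOf, hc, hL]

theorem pvSplitOn_eq_linesOf (cs : List Char) :
    PySem.Chars.splitOn cs ['\n'] = pvLinesOf cs := by
  have := pvSplitOn_go_eq (cs.length + 1) cs [] [] (by omega)
  cases hL : pvLinesOf cs with
  | nil => exact absurd hL (pvLinesOf_ne_nil cs)
  | cons h r => rw [hL] at this; simpa [PySem.Chars.splitOn, hL] using this

-- every line is built from a prefix head and infix tail pieces
theorem pvLinesOf_shape (cs : List Char) :
    ∃ h r, pvLinesOf cs = h :: r ∧ h <+: cs ∧ ∀ l ∈ r, l <:+: cs := by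
  induction cs with
  | nil => exact ⟨[], [], rfl, List.nil_prefix, by simp⟩
  | cons c t ih =>
    obtain ⟨h, r, hhr, hp, hi⟩ := ih
    by_cases hc : c = '\n'
    · subst hc
      refine ⟨[], h :: r, by simp [pvLinesOf, hhr], List.nil_prefix, ?_⟩
      intro l hl
      rcases List.mem_cons.mp hl with rfl | hl
      · exact (hp.isInfix).trans (List.infix_cons (List.infix_refl t))
      · exact (hi l hl).trans (List.infix_cons (List.infix_refl t))
    · refine ⟨c :: h, r, by simp [pvLinesOf, hc, hhr], List.cons_prefix_cons.mpr ⟨rfl, hp⟩, ?_⟩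
      intro l hl
      exact (hi l hl).trans (List.infix_cons (List.infix_refl t))

-- a newline-free prefix of cs is a prefix of the first line
theorem pvPrefix_head (sub : List Char) : ∀ (cs h : List Char) (r : List (List Char)),
    pvLinesOf cs = h :: r → sub <+: cs → ('\n' ∉ sub) → sub <+: h := by
  induction sub with
  | nil => intro _ _ _ _ _ _; exact List.nil_prefix
  | cons d s' ih =>
    intro cs h r hL hpre hnl
    obtain ⟨a, t', rfl⟩ : ∃ a t', cs = a :: t' := by
      cases cs with
      | nil => simp at hpre
      | cons a t' => exact ⟨a, t', rfl⟩
    obtain ⟨rfl, hs'⟩ := List.cons_prefix_cons.mp hpre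
    have hd : d ≠ '\n' := fun hdn => hnl (hdn ▸ List.mem_cons_self)
    obtain ⟨h', r', hhr', -, -⟩ := pvLinesOf_shape t'
    have heq : pvLinesOf (d :: t') = (d :: h') :: r' := by simp [pvLinesOf, hd, hhr']
    rw [heq] at hL
    obtain ⟨rfl, -⟩ := List.cons.inj hL
    exact List.cons_prefix_cons.mpr ⟨rfl, ih t' h' r' hhr' hs' (fun hm => hnl (List.mem_cons_of_mem d hm))⟩

-- KEY: a newline-free pattern occurs in some line iff it occurs in the whole text
-- a newline-free pattern is an infix of cs iff it is an infix of some line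
theorem pvInfix_iff_line (sub : List Char) (hnl : '\n' ∉ sub) :
    ∀ cs : List Char, (∃ l ∈ pvLinesOf cs, sub <:+: l) ↔ sub <:+: cs := by
  intro cs
  constructor
  · rintro ⟨l, hl, hsl⟩
    obtain ⟨h, r, hhr, hp, hi⟩ := pvLinesOf_shape cs
    rw [hhr] at hl
    rcases List.mem_cons.mp hl with rfl | hl
    · exact hsl.trans hp.isInfix
    · exact hsl.trans (hi l hl)
  · induction cs with
    | nil =>
      intro hs
      rw [List.infix_nil] at hs
      exact ⟨[], by simp [pvLinesOf], hs ▸ List.infix_refl []⟩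
    | cons c t ih =>
      intro hs
      obtain ⟨h', r', hhr'⟩ : ∃ h' r', pvLinesOf t = h' :: r' := by
        obtain ⟨h', r', hhr', -, -⟩ := pvLinesOf_shape t; exact ⟨h', r', hhr'⟩
      rcases List.infix_cons_iff.mp hs with hpre | hinf
      · cases sub with
        | nil =>
          obtain ⟨h, r, hhr, -, -⟩ := pvLinesOf_shape (c :: t)
          exact ⟨h, by simp [hhr], List.nil_infix⟩
        | cons d s' =>
          obtain ⟨rfl, hs'⟩ := List.cons_prefix_cons.mp hpre
          have hd : d ≠ '\n' := fun hdn => hnl (hdn ▸ List.mem_cons_self)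
          have hph : s' <+: h' :=
            pvPrefix_head s' t h' r' hhr' hs' (fun hm => hnl (List.mem_cons_of_mem d hm))
          refine ⟨d :: h', by simp [pvLinesOf, hd, hhr'], ?_⟩
          exact (List.cons_prefix_cons.mpr ⟨rfl, hph⟩).isInfix
      · obtain ⟨l, hl, hsl⟩ := ih hinf
        by_cases hc : c = '\n'
        · exact ⟨l, by simp [pvLinesOf, hc, hl], hsl⟩
        · rw [hhr'] at hl
          rcases List.mem_cons.mp hl with rfl | hl
          · exact ⟨c :: l, by simp [pvLinesOf, hc, hhr'], hsl.trans (List.infix_cons (List.infix_refl l))⟩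
          · exact ⟨l, by simp [pvLinesOf, hc, hhr', hl], hsl⟩

-- KEY: a newline-free pattern occurs in some line iff it occurs in the whole text
theorem pvAny_line_isIn (sub : List Char) (hnl : '\n' ∉ sub) (cs : List Char) :
    (pvLinesOf cs).any (fun l => PySem.Chars.isIn sub l) = PySem.Chars.isIn sub cs := by
  rw [Bool.eq_iff_iff]
  simp only [List.any_eq_true, PySem.Chars.isIn_iff_infix]
  exact pvInfix_iff_line sub hnl cs

-- A's inner loop returns skills++[cap kw] iff some line contains kw
theorem pvScanLines_eq (kw : String) (lines : List String) : ∀ skills,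
    pvScanLines kw skills lines =
      if lines.any (fun line => PySem.Str.isIn kw line) then skills ++ [pvCapitalize kw] else skills := by
  induction lines with
  | nil => intro skills; simp [pvScanLines]
  | cons line rest ih =>
    intro skills
    by_cases h : PySem.Chars.isIn kw.toList line.toList = true
    · simp [pvScanLines, PySem.Str.isIn_eq, h]
    · simp [pvScanLines, PySem.Str.isIn_eq, h, ih]

-- ===== VERDICT (by name: the statement is the Claim_ definition above) =====
theorem extract_skills_from_resume_spec : Claim_equal_extract_skills_from_resume := by
  intro text _
  unfold Spec_extract_skills_from_resume
  unfold extract_skills_from_resume extract_skills_from_resume_alt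
  have hlines : (PySem.Str.split? (PySem.Str.lower text) "\n").getD []
      = List.map String.ofList (pvLinesOf (PySem.Str.lower text).toList) := by
    simp [PySem.Str.split?, PySem.Chars.split?, pvSplitOn_eq_linesOf,
      show ("\n".toList : List Char) = ['\n'] from rfl]
  simp only [hlines]
  rw [PySem.List.foldl_congr_mem _ _
      (fun sk kw => if (List.map String.ofList (pvLinesOf (PySem.Str.lower text).toList)).any
          (fun line => PySem.Str.isIn kw line) then sk ++ [pvCapitalize kw] else sk) _
      (fun acc kw _ => pvScanLines_eq kw _ acc)]
  rw [PySem.List.foldl_append_if]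
  have hfc : ∀ kw ∈ pvSkillKeywords,
      ((List.map String.ofList (pvLinesOf (PySem.Str.lower text).toList)).any
        (fun line => PySem.Str.isIn kw line)) = PySem.Str.isIn kw (PySem.Str.lower text) := by
    intro kw hkw
    have hnl : '\n' ∉ kw.toList :=
      (by decide : ∀ k ∈ pvSkillKeywords, '\n' ∉ k.toList) kw hkw
    rw [List.any_map]
    simp only [Function.comp_def, PySem.Str.isIn_eq, String.toList_ofList]
    exact pvAny_line_isIn kw.toList hnl (PySem.Str.lower text).toList
  rw [List.filter_congr hfc]
  simp
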